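-- pv_equiv track=rewrite | github.com/DebBidhi/Building-a-Modern-Computer-From-First-Principles | 06/asembler.py | resolve_variables
-- ===== SOURCE A (Python) =====
-- def resolve_variables(assembly_lines, symbol_table):
--     """
--     Process variable symbols (@xxx) and add to symbol table.
--     Replace all symbols with their numeric values.
--
--     Args:
--         assembly_lines (list): List of assembly instructions
--         symbol_table (dict): Current symbol table
--
--     Returns:
--         list: Instructions with symbols replaced by values
--     """
--     # First identify and add any new variables to the symbol table
--     next_variable_address = 16  # Variables start at RAM address 16
--
--     for line in assembly_lines:
--         if line.startswith("@") and not line[1:].isdigit():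
--             variable = line[1:]
--             if variable not in symbol_table:
--                 symbol_table[variable] = next_variable_address
--                 next_variable_address += 1
--
--     # Then replace all symbols with their values
--     resolved_instructions = []
--     for line in assembly_lines:
--         if line.startswith("@") and not line[1:].isdigit():
--             symbol = line[1:]
--             if symbol in symbol_table:
--                 resolved_instructions.append(f"@{symbol_table[symbol]}")
--             else:
--                 # Should not happen if previous steps are correct
--                 raise ValueError(f"Undefined symbol: {symbol}")
--         else:
--             resolved_instructions.append(line)
--
--     return resolved_instructions
-- ===== SOURCE B (Python) =====
-- def resolve_variables(assembly_lines, symbol_table):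
--     """Single fused pass: assign a fresh address on first encounter of each
--     variable symbol and substitute in the same iteration (same mutation of
--     symbol_table, same return value as the two-pass version)."""
--     next_variable_address = 16
--     resolved_instructions = []
--     for line in assembly_lines:
--         if line.startswith("@") and not line[1:].isdigit():
--             symbol = line[1:]
--             address = symbol_table.get(symbol)
--             if address is None:
--                 address = next_variable_address
--                 symbol_table[symbol] = address
--                 next_variable_address += 1
--             resolved_instructions.append(f"@{address}")
--         else:
--             resolved_instructions.append(line)
--     return resolved_instructions
-- ===== Notes on version B (the rewrite author's own statement) =====
-- stated objective: simpler
-- what changed: A's two sequential passes (first assign addresses to all new variable symbols, then substitute using the completed table) are fused into a single loop that assigns on first encounter and substitutes in the same iteration, dropping A's second membership test and unreachable raise.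
import Mathlib
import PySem

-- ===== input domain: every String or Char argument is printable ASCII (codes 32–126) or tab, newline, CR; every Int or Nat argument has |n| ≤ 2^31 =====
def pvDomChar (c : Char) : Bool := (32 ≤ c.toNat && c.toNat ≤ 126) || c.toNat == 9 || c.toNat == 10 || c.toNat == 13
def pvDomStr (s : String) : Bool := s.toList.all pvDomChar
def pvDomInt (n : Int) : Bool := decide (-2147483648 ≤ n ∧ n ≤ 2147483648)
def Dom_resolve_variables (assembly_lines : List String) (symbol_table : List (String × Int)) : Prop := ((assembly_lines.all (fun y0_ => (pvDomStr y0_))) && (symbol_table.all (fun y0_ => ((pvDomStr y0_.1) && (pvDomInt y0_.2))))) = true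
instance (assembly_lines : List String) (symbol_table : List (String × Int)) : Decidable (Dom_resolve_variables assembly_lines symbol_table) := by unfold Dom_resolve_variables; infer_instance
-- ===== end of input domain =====

-- B fuses A's two passes into one loop (first-encounter assignment and substitution
-- in the same iteration); equivalence is about the RETURN value, but B also performs
-- the same in-place mutation of symbol_table as A.

-- ===== PORT A =====
-- shared test: line.startswith("@") and not line[1:].isdigit()
def rvIsVar (line : String) : Bool :=
  PySem.Str.startswith line "@" && !(PySem.Str.strIsdigit (PySem.Str.slice line (some 1) none))

-- first loop of A: add new variables to the symbol table
def rvPass1 (st : PySem.Dict String Int × Int) (line : String) : PySem.Dict String Int × Int :=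
  if rvIsVar line then
    let varName := PySem.Str.slice line (some 1) none
    if st.1.contains varName then st else (st.1.insert varName st.2, st.2 + 1)
  else st

def resolve_variables (assembly_lines : List String) (symbol_table : List (String × Int)) : List String :=
  let st := assembly_lines.foldl rvPass1 (PySem.Dict.mk symbol_table, 16)
  -- second loop of A: replace every symbol using the completed table
  assembly_lines.foldl (fun resolved line =>
    if rvIsVar line then
      let symbol := PySem.Str.slice line (some 1) none
      match st.1.get? symbol with
      | some v => resolved ++ ["@" ++ PySem.Int.toStr v]
      | none => resolved ++ [line]  -- A raises ValueError here; unreachable, since the first loop inserted every such symbol (proved below)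
    else resolved ++ [line]) []

-- ===== PORT B =====
-- single fused loop over (resolved_instructions, symbol_table, next_variable_address)
def rvStepB (acc : List String × PySem.Dict String Int × Int) (line : String) :
    List String × PySem.Dict String Int × Int :=
  if rvIsVar line then
    let symbol := PySem.Str.slice line (some 1) none
    match acc.2.1.get? symbol with
    | some address => (acc.1 ++ ["@" ++ PySem.Int.toStr address], acc.2)
    | none => (acc.1 ++ ["@" ++ PySem.Int.toStr acc.2.2], acc.2.1.insert symbol acc.2.2, acc.2.2 + 1)
  else (acc.1 ++ [line], acc.2)

def resolve_variables_alt (assembly_lines : List String) (symbol_table : List (String × Int)) : List String :=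
  (assembly_lines.foldl rvStepB ([], PySem.Dict.mk symbol_table, 16)).1

-- ===== PRECONDITION & SPEC =====
def Spec_resolve_variables (assembly_lines : List String) (symbol_table : List (String × Int)) (out : List String) : Prop := out = resolve_variables_alt assembly_lines symbol_table
instance (assembly_lines : List String) (symbol_table : List (String × Int)) (out : List String) : Decidable (Spec_resolve_variables assembly_lines symbol_table out) := by unfold Spec_resolve_variables; infer_instance

-- ===== CLAIM (what is proved, stated in full; the proofs are below) =====
def Claim_equal_resolve_variables : Prop := ∀ (assembly_lines : List String) (symbol_table : List (String × Int)), Dom_resolve_variables assembly_lines symbol_table → Spec_resolve_variables assembly_lines symbol_table (resolve_variables assembly_lines symbol_table)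

-- ===== LEMMAS AND PROOFS =====

-- lookups already present survive the rest of A's first pass (only fresh keys are inserted)
theorem rvPass1_mono (lines : List String) (d : PySem.Dict String Int) (n : Int)
    (k : String) (v : Int) (h : d.get? k = some v) :
    ((lines.foldl rvPass1 (d, n)).1).get? k = some v := by
  induction lines generalizing d n with
  | nil => simpa using h
  | cons line rest ih =>
    simp only [List.foldl_cons, rvPass1]
    split
    · split
      · exact ih d n h
      · rename_i hc
        apply ih
        rw [PySem.Dict.get?_insert_of_ne]
        · exact h
        · intro hk
          subst hk
          rw [PySem.Dict.contains_eq_isSome_get?, h] at hc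
          simp at hc
    · exact ih d n h

-- the fused loop produces exactly A's second pass with A's completed table
theorem rvFuse (lines : List String) (d : PySem.Dict String Int) (n : Int) (acc : List String) :
    (lines.foldl rvStepB (acc, d, n)).1 =
      lines.foldl (fun resolved line =>
        if rvIsVar line then
          let symbol := PySem.Str.slice line (some 1) none
          match ((lines.foldl rvPass1 (d, n)).1).get? symbol with
          | some v => resolved ++ ["@" ++ PySem.Int.toStr v]
          | none => resolved ++ [line]
        else resolved ++ [line]) acc := by
  induction lines generalizing d n acc with
  | nil => rfl
  | cons line rest ih =>
    simp only [List.foldl_cons]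
    by_cases hc : rvIsVar line
    · cases hg : d.get? (PySem.Str.slice line (some 1) none) with
      | some a =>
        have hcontains : d.contains (PySem.Str.slice line (some 1) none) = true := by
          rw [PySem.Dict.contains_eq_isSome_get?, hg]; rfl
        have hstep : rvStepB (acc, d, n) line = (acc ++ ["@" ++ PySem.Int.toStr a], d, n) := by
          simp [rvStepB, hc, hg]
        have hpass : rvPass1 (d, n) line = (d, n) := by
          simp [rvPass1, hc, hcontains]
        have hT := rvPass1_mono rest d n _ a hg
        rw [hstep, hpass, ih]
        congr 1
        simp only [hc, if_true, hT]
      | none =>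
        have hcontains : d.contains (PySem.Str.slice line (some 1) none) = false := by
          rw [PySem.Dict.contains_eq_isSome_get?, hg]; rfl
        have hstep : rvStepB (acc, d, n) line =
            (acc ++ ["@" ++ PySem.Int.toStr n],
              d.insert (PySem.Str.slice line (some 1) none) n, n + 1) := by
          simp [rvStepB, hc, hg]
        have hpass : rvPass1 (d, n) line =
            (d.insert (PySem.Str.slice line (some 1) none) n, n + 1) := by
          simp [rvPass1, hc, hcontains]
        have hT := rvPass1_mono rest (d.insert (PySem.Str.slice line (some 1) none) n) (n + 1) _ n
          (PySem.Dict.get?_insert_self ..)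
        rw [hstep, hpass, ih]
        congr 1
        simp only [hc, if_true, hT]
    · have hstep : rvStepB (acc, d, n) line = (acc ++ [line], d, n) := by
        simp [rvStepB, hc]
      have hpass : rvPass1 (d, n) line = (d, n) := by
        simp [rvPass1, hc]
      rw [hstep, hpass, ih]
      congr 1
      simp only [hc, if_false, Bool.false_eq_true]

theorem resolve_variables_spec : Claim_equal_resolve_variables := by
  intro lines tbl _
  unfold Spec_resolve_variables resolve_variables resolve_variables_alt
  rw [rvFuse]
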